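-- pv_equiv track=rewrite | github.com/Henderson-Harper/gramschmidtpython | GramSchmidtProcess.py | isMatrixOrthogonal
-- ===== SOURCE A (Python) =====
-- def checkIfVectorsAreEqualDimension(v1,v2): #given vectors v1 and v2, raises an error if their dimension is not equal
--     if len(v1) != len(v2):
--         raise Exception("cannot perform cross product on vectors of different dimensions")
--
-- def isMatrixOrthogonal(M): #given a matrix M, returns whether M has orthogonal columns
--     def isMatOrthHelper(v,series):
--         if series == []:
--             return True
--         elif isOrthogonal(v,series[0]):
--             return(isMatOrthHelper(v,series[1:]))
--         else:
--             return False
--     if M == []: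
--         return True
--     elif isMatOrthHelper(M[0],M[1:]):
--         return isMatrixOrthogonal(M[1:])
--     else:
--         return False
--
-- def isOrthogonal(v1,v2): #given vectors v1 and v2, returns whether v1 and v2 are orthogonal
--     isOrth = abs(dotProduct(v1,v2)) < 1e-5
--     return isOrth
--
-- def dotProduct(v1,v2): #given vectors v1 and v2, returns the dot product of the two vectors
--     checkIfVectorsAreEqualDimension(v1,v2)
--
--     def dotProductHelper(vv1,vv2):
--         if vv1 == [] or vv2 == []:
--             return 0
--         else:
--             return vv1[0] * vv2[0] + dotProductHelper(vv1[1:],vv2[1:])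
--
--     return dotProductHelper(v1,v2)
-- ===== SOURCE B (Python) =====
-- def isMatrixOrthogonal(M):
--     # Explicit double loop over index pairs i < j (same pair order as A's
--     # two-level recursion); dot product via sum over zip, == 0 on ints.
--     n = len(M)
--     for i in range(n):
--         for j in range(i + 1, n):
--             if sum(x * y for x, y in zip(M[i], M[j])) != 0:
--                 return False
--     return True
-- ===== Notes on version B (the rewrite author's own statement) =====
-- stated objective: idiomatic
-- what changed: Replaces the two-level tail recursion (outer recursion over suffixes, inner recursive helper per column, recursive dot product with a separate length-check helper) with a single flat double index loop over pairs i<j and a zip-based dot product.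
import Mathlib
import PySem

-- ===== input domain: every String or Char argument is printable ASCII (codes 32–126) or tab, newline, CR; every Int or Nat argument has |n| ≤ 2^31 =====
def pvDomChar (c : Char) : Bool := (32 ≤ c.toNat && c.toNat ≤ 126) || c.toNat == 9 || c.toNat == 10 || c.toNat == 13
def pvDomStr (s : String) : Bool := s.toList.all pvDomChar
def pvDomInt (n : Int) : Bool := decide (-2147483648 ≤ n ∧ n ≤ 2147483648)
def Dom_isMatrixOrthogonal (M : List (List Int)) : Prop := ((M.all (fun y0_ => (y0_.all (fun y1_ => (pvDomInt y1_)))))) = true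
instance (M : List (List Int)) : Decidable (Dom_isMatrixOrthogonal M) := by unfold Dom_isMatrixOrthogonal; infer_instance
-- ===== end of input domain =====

-- B replaces A's two-level tail recursion with a flat double index loop over
-- pairs i < j and a zip-based dot product (idiomatic; same cost).

-- ===== PORT A =====
-- dotProductHelper: recursive dot product, stops at the shorter vector
def dotProductHelper : List Int → List Int → Int
  | [], _ => 0
  | _, [] => 0
  | a :: as, b :: bs => a * b + dotProductHelper as bs

-- isOrthogonal: abs(dotProduct v1 v2) < 1e-5; on integer dot products this
-- float comparison holds exactly when the dot product is 0 (exact for all ints,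
-- since abs of a nonzero int is ≥ 1 > 1e-5)
def isOrthogonalA (v1 v2 : List Int) : Bool := (dotProductHelper v1 v2).natAbs == 0

-- inner helper: recursion over the remaining columns
def isMatOrthHelper (v : List Int) : List (List Int) → Bool
  | [] => true
  | w :: rest => if isOrthogonalA v w then isMatOrthHelper v rest else false

-- outer recursion over suffixes of M
def isMatrixOrthogonal : List (List Int) → Bool
  | [] => true
  | v :: rest => if isMatOrthHelper v rest then isMatrixOrthogonal rest else false

-- ===== PORT B =====
-- sum(x*y for x, y in zip(v, w))
def dotZip (v w : List Int) : Int := ((v.zip w).map (fun p => p.1 * p.2)).sum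

-- for i in range(n): for j in range(i+1, n): if dot ≠ 0: return False; return True
def isMatrixOrthogonal_alt (M : List (List Int)) : Bool :=
  (List.range M.length).all (fun i =>
    (List.range' (i + 1) (M.length - (i + 1))).all (fun j =>
      dotZip (M.getD i []) (M.getD j []) == 0))

-- ===== PRECONDITION & SPEC =====
-- Pre_ admits exactly the inputs on which A returns: A raises a dimension
-- Exception only when, scanning column pairs in its order (i before j,
-- increasing), it meets a length-mismatched pair before any non-orthogonal
-- pair; Pre_ therefore requires every mismatched pair to be preceded by a
-- non-orthogonal pair of equal lengths (vacuously true when all rows have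
-- equal length).
def preDot (v w : List Int) : Int := ((v.zip w).map (fun p => p.1 * p.2)).sum

def Pre_isMatrixOrthogonal (M : List (List Int)) : Prop :=
  ((List.range M.length).all fun i =>
    (List.range M.length).all fun j =>
      !(decide (i < j)) || ((M.getD i []).length == (M.getD j []).length) ||
      ((List.range M.length).any fun i' =>
        (List.range M.length).any fun j' =>
          decide (i' < j') && (decide (i' < i) || (i' == i && decide (j' < j))) &&
          ((M.getD i' []).length == (M.getD j' []).length) &&
          (preDot (M.getD i' []) (M.getD j' []) != 0))) = true
instance (M : List (List Int)) : Decidable (Pre_isMatrixOrthogonal M) := by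
  unfold Pre_isMatrixOrthogonal; infer_instance
def pvWitness_isMatrixOrthogonal : List (List Int) := [[1, 0], [0, 2], [0, 0]]

def Spec_isMatrixOrthogonal (M : List (List Int)) (out : Bool) : Prop := out = isMatrixOrthogonal_alt M
instance (M : List (List Int)) (out : Bool) : Decidable (Spec_isMatrixOrthogonal M out) := by unfold Spec_isMatrixOrthogonal; infer_instance

-- ===== CLAIM (what is proved, stated in full; the proofs are below) =====
def Claim_equal_isMatrixOrthogonal : Prop := ∀ (M : List (List Int)), Dom_isMatrixOrthogonal M → Pre_isMatrixOrthogonal M → Spec_isMatrixOrthogonal M (isMatrixOrthogonal M)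

-- ===== LEMMAS AND PROOFS =====

theorem dotZip_eq (v w : List Int) : dotZip v w = dotProductHelper v w := by
  induction v generalizing w with
  | nil => cases w <;> simp [dotZip, dotProductHelper]
  | cons a as ih =>
    cases w with
    | nil => simp [dotZip, dotProductHelper]
    | cons b bs =>
      simp [dotZip, dotProductHelper] at ih ⊢
      simp [ih]

theorem helper_eq_all (v : List Int) (l : List (List Int)) :
    isMatOrthHelper v l = l.all (fun w => isOrthogonalA v w) := by
  induction l with
  | nil => rfl
  | cons w rest ih =>
    simp only [isMatOrthHelper, List.all_cons, ih]
    by_cases h : isOrthogonalA v w <;> simp [h]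

theorem all_range_getD (p : List Int → Bool) (l : List (List Int)) :
    (List.range l.length).all (fun j => p (l.getD j [])) = l.all p := by
  induction l with
  | nil => rfl
  | cons w rest ih =>
    simp only [List.length_cons, List.range_succ_eq_map, List.all_cons, List.all_map,
      Function.comp_def, List.getD_cons_zero, List.getD_cons_succ]
    rw [ih]

theorem alt_cons (v : List Int) (rest : List (List Int)) :
    isMatrixOrthogonal_alt (v :: rest) =
      (rest.all (fun w => dotZip v w == 0) && isMatrixOrthogonal_alt rest) := by
  have hshift : ∀ s k : ℕ, List.range' (s + 1) k = (List.range' s k).map (fun x => 1 + x) := by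
    intro s k; rw [List.map_add_range', Nat.add_comm]
  have hget : ∀ j, (v :: rest).getD (1 + j) [] = rest.getD j [] := by
    intro j; rw [Nat.add_comm]; rfl
  simp only [isMatrixOrthogonal_alt, List.length_cons, List.range_succ_eq_map,
    List.all_cons, List.all_map, Function.comp_def]
  congr 1
  · -- the i = 0 term equals the scan of v against all later columns
    rw [Nat.add_sub_cancel, Nat.zero_add, List.range'_eq_map_range]
    simp only [List.all_map, Function.comp_def, List.getD_cons_zero, hget]
    exact all_range_getD (fun w => dotZip v w == 0) rest
  · -- the i ≥ 1 terms are the tail matrix's loop, indices shifted by one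
    refine List.all_congr rfl ?_
    intro i
    have hn : rest.length + 1 - (i.succ + 1) = rest.length - (i + 1) := by omega
    rw [show i.succ + 1 = (i + 1) + 1 from rfl, hn, hshift (i + 1)]
    simp only [List.all_map, Function.comp_def, hget, Nat.succ_eq_add_one, List.getD_cons_succ]

theorem eq_all (M : List (List Int)) : isMatrixOrthogonal M = isMatrixOrthogonal_alt M := by
  induction M with
  | nil => rfl
  | cons v rest ih =>
    rw [alt_cons, ← ih]
    simp only [isMatrixOrthogonal, helper_eq_all]
    have : ∀ w, isOrthogonalA v w = (dotZip v w == 0) := by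
      intro w; simp [isOrthogonalA, dotZip_eq, Int.natAbs_eq_zero]
    simp only [this]
    by_cases h : rest.all (fun w => dotZip v w == 0) <;> simp [h]

-- ===== VERDICT (by name: the statement is the Claim_ definition above) =====
theorem isMatrixOrthogonal_spec : Claim_equal_isMatrixOrthogonal := by
  intro M _ _
  unfold Spec_isMatrixOrthogonal
  exact eq_all M
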